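-- pv_equiv track=rewrite | github.com/18-12847/Programmers-School-Lv.0 | 피자 나눠 먹기(2).py | solution
-- ===== SOURCE A (Python) =====
-- def solution(n):
--     x = 6
--     if n < 4:
--         return 1
--     else:
--         for i in range(max(n, x),n*x+1):
--             if i % n == 0 and i % x == 0:
--                 return i // 6
-- ===== SOURCE B (Python) =====
-- def solution(n):
--     # O(1): answer is n // gcd(n, 6), and gcd(n, 6) is determined by n % 6.
--     if n < 4:
--         return 1
--     r = n % 6
--     if r == 0:
--         return n // 6
--     if r == 2 or r == 4:
--         return n // 2
--     if r == 3:
--         return n // 3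
--     return n
-- ===== Notes on version B (the rewrite author's own statement) =====
-- stated objective: faster
-- what changed: Replaces the linear scan over range(max(n,6), 6n+1) searching for the least common multiple with a constant-time closed form: the answer n//gcd(n,6) computed by a case split on n % 6.
import Mathlib
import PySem

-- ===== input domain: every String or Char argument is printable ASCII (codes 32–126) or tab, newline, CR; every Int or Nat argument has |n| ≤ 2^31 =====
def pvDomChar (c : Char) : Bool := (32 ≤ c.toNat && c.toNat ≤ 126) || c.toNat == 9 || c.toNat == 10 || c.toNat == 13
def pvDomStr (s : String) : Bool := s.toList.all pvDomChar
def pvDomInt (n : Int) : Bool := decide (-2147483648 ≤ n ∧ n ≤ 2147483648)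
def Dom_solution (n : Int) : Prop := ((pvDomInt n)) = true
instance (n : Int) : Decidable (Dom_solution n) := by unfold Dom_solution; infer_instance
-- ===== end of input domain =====

-- B replaces A's linear scan for the least common multiple of n and 6 with a
-- constant-time case split on n % 6 (answer = n // gcd(n,6)); objective: faster.

-- ===== PORT A =====
-- A: scan range(max(n,6), 6n+1) for the first common multiple of n and 6, return it // 6.
-- Python returns None if the loop exhausts; that never happens for n ≥ 4 (6n is a common
-- multiple), so the `none` arm's 0 is unreachable on the else branch.
def solution (n : Int) : Int :=
  let x : Int := 6
  if n < 4 then 1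
  else
    match (PySem.List.pyRange (max n x) (n * x + 1) 1).find?
        (fun i => PySem.Int.mod i n == 0 && PySem.Int.mod i x == 0) with
    | some i => PySem.Int.floordiv i 6
    | none => 0

-- ===== PORT B =====
def solution_alt (n : Int) : Int :=
  if n < 4 then 1
  else
    let r := PySem.Int.mod n 6
    if r == 0 then PySem.Int.floordiv n 6
    else if r == 2 || r == 4 then PySem.Int.floordiv n 2
    else if r == 3 then PySem.Int.floordiv n 3
    else n

-- ===== PRECONDITION & SPEC =====
def Spec_solution (n : Int) (out : Int) : Prop := out = solution_alt n
instance (n : Int) (out : Int) : Decidable (Spec_solution n out) := by unfold Spec_solution; infer_instance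

-- ===== CLAIM (what is proved, stated in full; the proofs are below) =====
def Claim_equal_solution : Prop := ∀ (n : Int), Dom_solution n → Spec_solution n (solution n)

-- ===== LEMMAS AND PROOFS =====

-- find? over a unit-step range returns the first element satisfying p.
theorem find?_pyRange_first (p : Int → Bool) (a b L : Int) (ha : a ≤ L) (hb : L < b)
    (hmin : ∀ j, a ≤ j → j < L → p j = false) (hL : p L = true) :
    (PySem.List.pyRange a b 1).find? p = some L := by
  rw [PySem.List.pyRange_one_append a L b ha (by omega), List.find?_append]
  have h1 : (PySem.List.pyRange a L 1).find? p = none := by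
    rw [List.find?_eq_none]
    intro x hx
    have hm := (PySem.List.mem_pyRange_one).mp hx
    simp [hmin x hm.1 hm.2]
  rw [h1, PySem.List.pyRange_one_cons hb]
  simp [List.find?, hL]

theorem solution_eq_alt (n : Int) : solution n = solution_alt n := by
  by_cases h4 : n < 4
  · simp [solution, solution_alt, h4]
  · rw [not_lt] at h4
    have hn : (0:Int) < n := by omega
    have hmod : PySem.Int.mod n 6 = n % 6 := PySem.Int.mod_eq_emod_of_pos (by omega)
    -- the predicate tests exact divisibility by n and by 6
    have hp : ∀ i : Int, 0 < i →
        ((fun i => PySem.Int.mod i n == 0 && PySem.Int.mod i 6 == 0) i = true ↔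
          (n ∣ i ∧ 6 ∣ i)) := by
      intro i _
      rw [Bool.and_eq_true, beq_iff_eq, beq_iff_eq,
        PySem.Int.mod_eq_emod_of_pos hn, PySem.Int.mod_eq_emod_of_pos (show (0:Int) < 6 by norm_num),
        ← Int.dvd_iff_emod_eq_zero, ← Int.dvd_iff_emod_eq_zero]
    -- helper finishing one residue case with first hit L = c * n
    have main : ∀ c : Int, 1 ≤ c → c ≤ 6 →
        (6 ∣ c * n) →
        (∀ k : Int, 1 ≤ k → k < c → ¬ (6 ∣ k * n)) →
        (6 ≤ c * n) →
        (PySem.List.pyRange (max n 6) (n * 6 + 1) 1).find?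
          (fun i => PySem.Int.mod i n == 0 && PySem.Int.mod i 6 == 0) = some (c * n) := by
      intro c hc1 hc6 hdvd hmin hge
      apply find?_pyRange_first _ _ _ (c * n)
      · exact max_le (le_mul_of_one_le_left hn.le hc1) hge
      · nlinarith
      · intro j hj1 hj2
        have hj6 : 6 ≤ j := le_trans (le_max_right n 6) hj1
        have hjn : n ≤ j := le_trans (le_max_left n 6) hj1
        by_contra hj
        rw [Bool.not_eq_false, hp j (by omega)] at hj
        obtain ⟨⟨k, hk⟩, h6⟩ := hj
        have hk1 : 1 ≤ k := by
          by_contra hlt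
          have : n * k ≤ 0 := mul_nonpos_of_nonneg_of_nonpos hn.le (by omega)
          omega
        have hkc : k < c := by
          by_contra hge2
          have : c * n ≤ n * k := by nlinarith
          omega
        exact hmin k hk1 hkc (by rw [mul_comm]; rw [hk] at h6; exact h6)
      · rw [hp _ (by omega)]
        exact ⟨dvd_mul_left n c, hdvd⟩
    have hr0 : 0 ≤ n % 6 := Int.emod_nonneg n (by norm_num)
    have hr5 : n % 6 < 6 := Int.emod_lt_of_pos n (by norm_num)
    have hsplit : n % 6 = 0 ∨ n % 6 = 1 ∨ n % 6 = 2 ∨ n % 6 = 3 ∨ n % 6 = 4 ∨ n % 6 = 5 := by omega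
    -- pick the first common multiple c * n per residue of n mod 6
    obtain hr | hr | hr | hr | hr | hr := hsplit
    · have h := main 1 (by norm_num) (by norm_num) (by omega) (by intro k h1 h2; omega) (by omega)
      simp only [solution, solution_alt, if_neg (show ¬ n < 4 by omega)]
      rw [h]; simp only [hmod, hr]; norm_num
    · have h := main 6 (by norm_num) (by norm_num) (by omega)
        (by intro k h1 h2; interval_cases k <;> omega) (by omega)
      simp only [solution, solution_alt, if_neg (show ¬ n < 4 by omega)]
      rw [h]; simp only [hmod, hr]; norm_num; try omega
    · have h := main 3 (by norm_num) (by norm_num) (by omega)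
        (by intro k h1 h2; interval_cases k <;> omega) (by omega)
      simp only [solution, solution_alt, if_neg (show ¬ n < 4 by omega)]
      rw [h]; simp only [hmod, hr]; norm_num; try omega
    · have h := main 2 (by norm_num) (by norm_num) (by omega)
        (by intro k h1 h2; interval_cases k <;> omega) (by omega)
      simp only [solution, solution_alt, if_neg (show ¬ n < 4 by omega)]
      rw [h]; simp only [hmod, hr]; norm_num; try omega
    · have h := main 3 (by norm_num) (by norm_num) (by omega)
        (by intro k h1 h2; interval_cases k <;> omega) (by omega)
      simp only [solution, solution_alt, if_neg (show ¬ n < 4 by omega)]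
      rw [h]; simp only [hmod, hr]; norm_num; try omega
    · have h := main 6 (by norm_num) (by norm_num) (by omega)
        (by intro k h1 h2; interval_cases k <;> omega) (by omega)
      simp only [solution, solution_alt, if_neg (show ¬ n < 4 by omega)]
      rw [h]; simp only [hmod, hr]; norm_num; try omega

-- ===== VERDICT (by name: the statement is the Claim_ definition above) =====
theorem solution_spec : Claim_equal_solution := by
  intro n _
  unfold Spec_solution
  exact solution_eq_alt n
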